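-- pv_equiv track=rewrite | github.com/fruzitent/kpi-122 | q1_bases/p09/src/task1.py | get_ascii_words
-- ===== SOURCE A (Python) =====
-- from string import ascii_letters
--
-- def get_ascii_words(string):
--     result = []
--
--     for word in string.split():
--
--         for letter in word:
--             if letter not in ascii_letters:
--                 break
--         else:
--             result.append(word)
--
--     return result
-- ===== SOURCE B (Python) =====
-- def get_ascii_words(string):
--     return [word for word in string.split() if word.isalpha()]
-- ===== Notes on version B (the rewrite author's own statement) =====
-- stated objective: idiomatic
-- what changed: Replaces the for-else inner loop that scans each character against the ascii_letters constant, and the explicit accumulator list, with a single comprehension filtering words by str.isalpha; split() yields no empty words and on ASCII input str.isalpha tests exactly the same letter set.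
import Mathlib
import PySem

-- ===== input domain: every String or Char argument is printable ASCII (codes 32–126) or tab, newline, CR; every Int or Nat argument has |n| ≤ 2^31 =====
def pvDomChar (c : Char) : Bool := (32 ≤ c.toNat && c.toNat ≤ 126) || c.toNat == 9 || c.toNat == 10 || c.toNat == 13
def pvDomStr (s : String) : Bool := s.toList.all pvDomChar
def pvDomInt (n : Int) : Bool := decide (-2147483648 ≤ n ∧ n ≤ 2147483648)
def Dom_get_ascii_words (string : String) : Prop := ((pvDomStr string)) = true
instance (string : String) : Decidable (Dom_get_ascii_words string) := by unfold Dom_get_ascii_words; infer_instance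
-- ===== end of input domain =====

-- B replaces A's for-else char-membership inner loop and accumulator with a comprehension filtering words by str.isalpha (idiomatic).

-- ===== PORT A =====
-- the module constant `ascii_letters`
def pvAsciiLetters : List Char :=
  "abcdefghijklmnopqrstuvwxyzABCDEFGHIJKLMNOPQRSTUVWXYZ".toList

-- A's inner `for letter in word: if letter not in ascii_letters: break / else:` —
-- true iff the loop completes without break
def pvNoBreak : List Char → Bool
  | [] => true
  | c :: rest => if pvAsciiLetters.contains c then pvNoBreak rest else false

def get_ascii_words (string : String) : List String :=
  (PySem.Str.split₀ string).foldl
    (fun result word => if pvNoBreak word.toList then result ++ [word] else result) []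

-- ===== PORT B =====
def get_ascii_words_alt (string : String) : List String :=
  (PySem.Str.split₀ string).filter PySem.Str.strIsalpha

-- ===== PRECONDITION & SPEC =====
def Spec_get_ascii_words (string : String) (out : List String) : Prop := out = get_ascii_words_alt string
instance (string : String) (out : List String) : Decidable (Spec_get_ascii_words string out) := by unfold Spec_get_ascii_words; infer_instance

-- ===== CLAIM (what is proved, stated in full; the proofs are below) =====
def Claim_equal_get_ascii_words : Prop := ∀ (string : String), Dom_get_ascii_words string → Spec_get_ascii_words string (get_ascii_words string)

-- ===== LEMMAS AND PROOFS =====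

set_option maxRecDepth 8000 in
lemma pv_contains_eq_isalpha_small :
    ∀ n, n < 256 →
      pvAsciiLetters.contains (Char.ofNat n) = PySem.Chars.isalpha (Char.ofNat n) := by
  decide

lemma pv_letters_all : pvAsciiLetters.all (fun w => decide (w.toNat < 256)) = true := by decide

lemma pv_letters_lt : ∀ w ∈ pvAsciiLetters, w.toNat < 256 := by
  intro w hw
  have := List.all_eq_true.mp pv_letters_all w hw
  simpa using this

-- membership in the ascii_letters constant is exactly PySem's per-char isalpha
lemma pv_contains_eq_isalpha (c : Char) :
    pvAsciiLetters.contains c = PySem.Chars.isalpha c := by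
  by_cases h : c.toNat < 256
  · have := pv_contains_eq_isalpha_small c.toNat h
    rwa [Char.ofNat_toNat] at this
  · have h1 : pvAsciiLetters.contains c = false := by
      simp only [List.contains_eq_mem, decide_eq_false_iff_not]
      intro hm
      exact h (pv_letters_lt c hm)
    have h2 : PySem.Chars.isalpha c = false := by
      simp only [PySem.Chars.isalpha, PySem.Chars.isupper, PySem.Chars.islower,
        Bool.or_eq_false_iff, Bool.and_eq_false_iff, decide_eq_false_iff_not,
        Char.le_def, UInt32.le_iff_toNat_le]
      have h' : 256 ≤ c.val.toNat := Nat.le_of_not_lt h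
      have hz : ('Z').val.toNat = 90 := by decide
      have hzz : ('z').val.toNat = 122 := by decide
      constructor <;> right <;> omega
    rw [h1, h2]

-- A's no-break scan is the all-letters test
lemma pv_noBreak_eq_all (l : List Char) :
    pvNoBreak l = l.all PySem.Chars.isalpha := by
  induction l with
  | nil => rfl
  | cons c rest ih =>
    simp only [pvNoBreak, List.all_cons, pv_contains_eq_isalpha, ih]
    by_cases h : PySem.Chars.isalpha c = true <;> simp [h]

-- every chunk produced by split₀.go is nonempty (given the accumulator's are)
lemma pv_split₀_go_ne_nil :
    ∀ (s cur : List Char) (acc : List (List Char)),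
      (∀ w ∈ acc, w ≠ []) → ∀ w ∈ PySem.Chars.split₀.go s cur acc, w ≠ [] := by
  intro s
  induction s with
  | nil =>
    intro cur acc hacc w hw
    simp only [PySem.Chars.split₀.go] at hw
    split at hw
    · exact hacc w (List.mem_reverse.mp hw)
    · rcases List.mem_cons.mp (List.mem_reverse.mp hw) with h | h
      · subst h
        rename_i hcur
        simp only [List.isEmpty_iff] at hcur
        simp [List.reverse_eq_nil_iff, hcur]
      · exact hacc w h
  | cons c rest ih =>
    intro cur acc hacc w hw
    simp only [PySem.Chars.split₀.go] at hw
    split at hw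
    · split at hw
      · exact ih [] acc hacc w hw
      · refine ih [] (cur.reverse :: acc) ?_ w hw
        intro v hv
        rcases List.mem_cons.mp hv with h | h
        · subst h
          rename_i hcur
          simp only [List.isEmpty_iff] at hcur
          simp [List.reverse_eq_nil_iff, hcur]
        · exact hacc v h
    · exact ih (c :: cur) acc hacc w hw

-- split() yields no empty words
lemma pv_split₀_ne_nil (s : String) :
    ∀ w ∈ PySem.Str.split₀ s, w.toList ≠ [] := by
  intro w hw
  simp only [PySem.Str.split₀, List.mem_map] at hw
  obtain ⟨l, hl, rfl⟩ := hw
  have := pv_split₀_go_ne_nil s.toList [] [] (by simp) l hl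
  simpa using this

-- ===== VERDICT (by name: the statement is the Claim_ definition above) =====
theorem get_ascii_words_spec : Claim_equal_get_ascii_words := by
  intro s _
  unfold Spec_get_ascii_words get_ascii_words get_ascii_words_alt
  rw [PySem.List.foldl_append_if_eq_filter]
  simp only [List.nil_append]
  apply List.filter_congr
  intro w hw
  rw [pv_noBreak_eq_all]
  simp only [PySem.Str.strIsalpha, PySem.Chars.strIsalpha]
  have hne := pv_split₀_ne_nil s w hw
  simp [hne]
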